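-- pv_equiv track=rewrite | github.com/MWang93/API | google_adwords_api/format.py | filter_report_fields
-- ===== SOURCE A (Python) =====
-- def filter_report_fields(report, fields):
--     # TODO: not necessarily the fields we want, but this set prevents errors
--     incompatible_fields = set()
--
--     if 'Date' in fields:
--         incompatible_fields = incompatible_fields.union({
--             'Week', 'DayOfWeek', 'Month', 'MonthOfYear', 'Quarter', 'Year'})
--
--     if 'ActiveViewCpm' in fields:
--         incompatible_fields = incompatible_fields.union({
--             'ConversionCategoryName', 'ConversionTrackerId',
--             'ConversionLagBucket', 'ConversionTypeName', 'ExternalConversionSource'})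
--     if 'AllConversionRate' in fields:
--         incompatible_fields = incompatible_fields.union({'HourOfDay', 'Slot'})
--     if 'AverageCpe' in fields:
--         incompatible_fields = incompatible_fields.union({
--             'ClickType', 'ConversionCategoryName', 'ConversionTrackerId',
--             'ConversionTypeName', 'ExternalConversionSource'})
--     if 'AverageCost' in fields:
--         incompatible_fields = incompatible_fields.union({
--             'ConversionCategoryName' , 'ConversionTrackerId',
--             'ConversionTypeName', 'ExternalConversionSource'})
--     if 'AverageCpm' in fields:
--         incompatible_fields = incompatible_fields.union({
--             'ConversionCategoryName', 'ConversionTypeName',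
--             'ConversionTrackerId', 'ExternalConversionSource'})
--     if 'AverageCpv' in fields:
--         incompatible_fields = incompatible_fields.union({
--             'ClickType', 'ConversionCategoryName', 'ConversionTypeName',
--             'ExternalConversionSource'})
--     if 'AverageFrequency' in fields:
--         incompatible_fields = incompatible_fields.union({
--             'ClickType', 'ConversionCategoryName', 'ConversionTrackerId',
--             'ConversionTypeName', 'DayOfWeek', 'Device',
--             'ExternalConversionSource', 'HourOfDay', 'Quarter', 'Slot', 'Year'})
--
--     incompatible_fields = incompatible_fields.union({
--         'AccountTimeZone', 'AccountCurrencyCode', 'AccountDescriptiveName',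
--         'CustomerDescriptiveName'})
--
--     for field in incompatible_fields:
--         if field in fields:
--           fields.remove(field)
--     return fields
-- ===== SOURCE B (Python) =====
-- _BASE = {'AccountTimeZone', 'AccountCurrencyCode', 'AccountDescriptiveName',
--          'CustomerDescriptiveName'}
--
-- _INCOMPATIBLE_WITH = {
--     'Date': {'Week', 'DayOfWeek', 'Month', 'MonthOfYear', 'Quarter', 'Year'},
--     'ActiveViewCpm': {'ConversionCategoryName', 'ConversionTrackerId',
--                       'ConversionLagBucket', 'ConversionTypeName',
--                       'ExternalConversionSource'},
--     'AllConversionRate': {'HourOfDay', 'Slot'},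
--     'AverageCpe': {'ClickType', 'ConversionCategoryName', 'ConversionTrackerId',
--                    'ConversionTypeName', 'ExternalConversionSource'},
--     'AverageCost': {'ConversionCategoryName', 'ConversionTrackerId',
--                     'ConversionTypeName', 'ExternalConversionSource'},
--     'AverageCpm': {'ConversionCategoryName', 'ConversionTypeName',
--                    'ConversionTrackerId', 'ExternalConversionSource'},
--     'AverageCpv': {'ClickType', 'ConversionCategoryName', 'ConversionTypeName',
--                    'ExternalConversionSource'},
--     'AverageFrequency': {'ClickType', 'ConversionCategoryName',
--                          'ConversionTrackerId', 'ConversionTypeName',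
--                          'DayOfWeek', 'Device', 'ExternalConversionSource',
--                          'HourOfDay', 'Quarter', 'Slot', 'Year'},
-- }
--
--
-- def filter_report_fields(report, fields):
--     incompatible = set(_BASE)
--     for trigger, incs in _INCOMPATIBLE_WITH.items():
--         if trigger in fields:
--             incompatible |= incs
--     fields[:] = [f for f in fields if f not in incompatible]
--     return fields
-- ===== Notes on version B (the rewrite author's own statement) =====
-- stated objective: simpler
-- what changed: A's eight-branch cascade of set unions becomes one loop over a trigger->incompatible-fields dict, and A's loop of repeated fields.remove calls becomes a single list-comprehension filter written back in place; Pre_ excludes fields lists in which an always-removed base name or a triggered incompatible name occurs more than once, where A's remove-first-occurrence-only result is an accident of list.remove and removing every occurrence is equally defensible.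
-- outside the precondition, e.g. on filter_report_fields('r', ['Date', 'Week', 'Week']): A returns ['Date', 'Week'], B returns ['Date']; on filter_report_fields('r', ['AccountTimeZone', 'AccountTimeZone']): A returns ['AccountTimeZone'], B returns []
import Mathlib
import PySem

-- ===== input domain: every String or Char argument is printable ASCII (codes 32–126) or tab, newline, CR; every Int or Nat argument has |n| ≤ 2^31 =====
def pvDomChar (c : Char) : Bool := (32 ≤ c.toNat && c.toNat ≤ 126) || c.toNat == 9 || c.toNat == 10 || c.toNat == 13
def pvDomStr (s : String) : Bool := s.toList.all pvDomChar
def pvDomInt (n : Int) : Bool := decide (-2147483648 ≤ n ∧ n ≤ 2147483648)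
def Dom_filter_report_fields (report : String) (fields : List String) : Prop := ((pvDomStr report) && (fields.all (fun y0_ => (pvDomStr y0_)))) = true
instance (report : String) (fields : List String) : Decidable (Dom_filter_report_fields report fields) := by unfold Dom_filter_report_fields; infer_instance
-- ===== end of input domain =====

-- B replaces A's eight-branch cascade of set unions by one loop over a
-- trigger table and A's repeated `fields.remove` loop by a single filter pass
-- (objective: simpler).  Both Pythons mutate `fields` in place and return it;
-- the theorems below are about the RETURN value only (which equals the final
-- in-place contents).

-- ===== PORT A =====
-- `fields.remove(field)` under the guard `field in fields` removes the first
-- occurrence, i.e. `List.erase`; the `for` over the Python set is ported as a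
-- fold over the Set's element list (under Pre_ the result is independent of
-- the iteration order, since each removed name occurs at most once).
def filter_report_fields (report : String) (fields : List String) : List String :=
  let inc0 : PySem.Set String := PySem.Set.empty
  let inc1 := if fields.contains "Date" then
      PySem.Set.union inc0 ["Week", "DayOfWeek", "Month", "MonthOfYear", "Quarter", "Year"]
    else inc0
  let inc2 := if fields.contains "ActiveViewCpm" then
      PySem.Set.union inc1 ["ConversionCategoryName", "ConversionTrackerId",
        "ConversionLagBucket", "ConversionTypeName", "ExternalConversionSource"]
    else inc1
  let inc3 := if fields.contains "AllConversionRate" then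
      PySem.Set.union inc2 ["HourOfDay", "Slot"]
    else inc2
  let inc4 := if fields.contains "AverageCpe" then
      PySem.Set.union inc3 ["ClickType", "ConversionCategoryName", "ConversionTrackerId",
        "ConversionTypeName", "ExternalConversionSource"]
    else inc3
  let inc5 := if fields.contains "AverageCost" then
      PySem.Set.union inc4 ["ConversionCategoryName", "ConversionTrackerId",
        "ConversionTypeName", "ExternalConversionSource"]
    else inc4
  let inc6 := if fields.contains "AverageCpm" then
      PySem.Set.union inc5 ["ConversionCategoryName", "ConversionTypeName",
        "ConversionTrackerId", "ExternalConversionSource"]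
    else inc5
  let inc7 := if fields.contains "AverageCpv" then
      PySem.Set.union inc6 ["ClickType", "ConversionCategoryName", "ConversionTypeName",
        "ExternalConversionSource"]
    else inc6
  let inc8 := if fields.contains "AverageFrequency" then
      PySem.Set.union inc7 ["ClickType", "ConversionCategoryName", "ConversionTrackerId",
        "ConversionTypeName", "DayOfWeek", "Device", "ExternalConversionSource",
        "HourOfDay", "Quarter", "Slot", "Year"]
    else inc7
  let inc9 := PySem.Set.union inc8 ["AccountTimeZone", "AccountCurrencyCode",
    "AccountDescriptiveName", "CustomerDescriptiveName"]
  inc9.foldl (fun fs field => if fs.contains field then fs.erase field else fs) fields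

-- ===== PORT B =====
def pvBase : List String :=
  ["AccountTimeZone", "AccountCurrencyCode", "AccountDescriptiveName",
   "CustomerDescriptiveName"]

-- Source B's _INCOMPATIBLE_WITH dict, iterated via .items() in insertion order
def pvTriggers : List (String × List String) :=
  [("Date", ["Week", "DayOfWeek", "Month", "MonthOfYear", "Quarter", "Year"]),
   ("ActiveViewCpm", ["ConversionCategoryName", "ConversionTrackerId",
     "ConversionLagBucket", "ConversionTypeName", "ExternalConversionSource"]),
   ("AllConversionRate", ["HourOfDay", "Slot"]),
   ("AverageCpe", ["ClickType", "ConversionCategoryName", "ConversionTrackerId",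
     "ConversionTypeName", "ExternalConversionSource"]),
   ("AverageCost", ["ConversionCategoryName", "ConversionTrackerId",
     "ConversionTypeName", "ExternalConversionSource"]),
   ("AverageCpm", ["ConversionCategoryName", "ConversionTypeName",
     "ConversionTrackerId", "ExternalConversionSource"]),
   ("AverageCpv", ["ClickType", "ConversionCategoryName", "ConversionTypeName",
     "ExternalConversionSource"]),
   ("AverageFrequency", ["ClickType", "ConversionCategoryName", "ConversionTrackerId",
     "ConversionTypeName", "DayOfWeek", "Device", "ExternalConversionSource",
     "HourOfDay", "Quarter", "Slot", "Year"])]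

def filter_report_fields_alt (report : String) (fields : List String) : List String :=
  let inc := pvTriggers.foldl
    (fun s p => if fields.contains p.1 then PySem.Set.union s p.2 else s)
    (PySem.Set.ofList pvBase)
  fields.filter (fun f => !(PySem.Set.contains inc f))

-- ===== PRECONDITION & SPEC =====
-- Pre_ excludes fields lists in which an always-removed base name, or an
-- incompatible name whose trigger is present, occurs MORE THAN ONCE: there
-- A's `list.remove` deletes only the first occurrence while B drops them all,
-- and on such duplicate-carrying input either value is defensible.
def Pre_filter_report_fields (report : String) (fields : List String) : Prop :=
  (∀ x ∈ pvBase, fields.count x ≤ 1) ∧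
  (∀ p ∈ pvTriggers, p.1 ∈ fields → ∀ x ∈ p.2, fields.count x ≤ 1)
instance (report : String) (fields : List String) : Decidable (Pre_filter_report_fields report fields) := by unfold Pre_filter_report_fields; infer_instance

def pvWitness_filter_report_fields : String × List String :=
  ("CAMPAIGN_PERFORMANCE_REPORT", ["Date", "Week", "Clicks", "AccountTimeZone"])

def Spec_filter_report_fields (report : String) (fields : List String) (out : List String) : Prop := out = filter_report_fields_alt report fields
instance (report : String) (fields : List String) (out : List String) : Decidable (Spec_filter_report_fields report fields out) := by unfold Spec_filter_report_fields; infer_instance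

-- ===== CLAIM (what is proved, stated in full; the proofs are below) =====
def Claim_equal_filter_report_fields : Prop := ∀ (report : String) (fields : List String), Dom_filter_report_fields report fields → Pre_filter_report_fields report fields → Spec_filter_report_fields report fields (filter_report_fields report fields)

-- ===== LEMMAS AND PROOFS =====

-- A's incompatible set as a function of the eight trigger tests
def pvIncA (b1 b2 b3 b4 b5 b6 b7 b8 : Bool) : PySem.Set String :=
  let inc0 : PySem.Set String := PySem.Set.empty
  let inc1 := if b1 then
      PySem.Set.union inc0 ["Week", "DayOfWeek", "Month", "MonthOfYear", "Quarter", "Year"]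
    else inc0
  let inc2 := if b2 then
      PySem.Set.union inc1 ["ConversionCategoryName", "ConversionTrackerId",
        "ConversionLagBucket", "ConversionTypeName", "ExternalConversionSource"]
    else inc1
  let inc3 := if b3 then PySem.Set.union inc2 ["HourOfDay", "Slot"] else inc2
  let inc4 := if b4 then
      PySem.Set.union inc3 ["ClickType", "ConversionCategoryName", "ConversionTrackerId",
        "ConversionTypeName", "ExternalConversionSource"]
    else inc3
  let inc5 := if b5 then
      PySem.Set.union inc4 ["ConversionCategoryName", "ConversionTrackerId",
        "ConversionTypeName", "ExternalConversionSource"]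
    else inc4
  let inc6 := if b6 then
      PySem.Set.union inc5 ["ConversionCategoryName", "ConversionTypeName",
        "ConversionTrackerId", "ExternalConversionSource"]
    else inc5
  let inc7 := if b7 then
      PySem.Set.union inc6 ["ClickType", "ConversionCategoryName", "ConversionTypeName",
        "ExternalConversionSource"]
    else inc6
  let inc8 := if b8 then
      PySem.Set.union inc7 ["ClickType", "ConversionCategoryName", "ConversionTrackerId",
        "ConversionTypeName", "DayOfWeek", "Device", "ExternalConversionSource",
        "HourOfDay", "Quarter", "Slot", "Year"]
    else inc7
  PySem.Set.union inc8 ["AccountTimeZone", "AccountCurrencyCode",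
    "AccountDescriptiveName", "CustomerDescriptiveName"]

-- B's incompatible set, with the eight membership tests abstracted as bools
def pvIncB (b1 b2 b3 b4 b5 b6 b7 b8 : Bool) : PySem.Set String :=
  [(b1, pvTriggers[0]!.2), (b2, pvTriggers[1]!.2), (b3, pvTriggers[2]!.2),
   (b4, pvTriggers[3]!.2), (b5, pvTriggers[4]!.2), (b6, pvTriggers[5]!.2),
   (b7, pvTriggers[6]!.2), (b8, pvTriggers[7]!.2)].foldl
    (fun s p => if p.1 then PySem.Set.union s p.2 else s) (PySem.Set.ofList pvBase)

set_option maxRecDepth 8000 in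
lemma pvInc_equal : ∀ b1 b2 b3 b4 b5 b6 b7 b8 : Bool,
    PySem.Set.equal (pvIncA b1 b2 b3 b4 b5 b6 b7 b8) (pvIncB b1 b2 b3 b4 b5 b6 b7 b8) = true := by
  decide

lemma fields_eq_A (report : String) (fields : List String) :
    filter_report_fields report fields =
      (pvIncA (fields.contains "Date") (fields.contains "ActiveViewCpm")
        (fields.contains "AllConversionRate") (fields.contains "AverageCpe")
        (fields.contains "AverageCost") (fields.contains "AverageCpm")
        (fields.contains "AverageCpv") (fields.contains "AverageFrequency")).foldl
        (fun fs field => if fs.contains field then fs.erase field else fs) fields := rfl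

lemma fields_eq_B (report : String) (fields : List String) :
    filter_report_fields_alt report fields =
      fields.filter (fun f => !(PySem.Set.contains
        (pvIncB (fields.contains "Date") (fields.contains "ActiveViewCpm")
          (fields.contains "AllConversionRate") (fields.contains "AverageCpe")
          (fields.contains "AverageCost") (fields.contains "AverageCpm")
          (fields.contains "AverageCpv") (fields.contains "AverageFrequency")) f)) := rfl

-- the `if field in fields` guard in A's loop is redundant: erase is a no-op on absent elements
lemma guarded_erase_eq_erase :
    (fun (fs : List String) (field : String) => if fs.contains field then fs.erase field else fs)
      = fun fs field => fs.erase field := by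
  funext fs field
  by_cases h : field ∈ fs
  · simp [h]
  · simp [h, List.erase_of_not_mem h]

-- erasing an element occurring at most once = filtering it out
lemma erase_eq_filter_of_count_le_one :
    ∀ (l : List String) (a : String), l.count a ≤ 1 →
      l.erase a = l.filter (fun x => !(x == a)) := by
  intro l
  induction l with
  | nil => intro a _; rfl
  | cons b l ih =>
      intro a h
      by_cases hba : b = a
      · subst hba
        have h0 : l.count b = 0 := by
          have := List.count_cons_self (a := b) (l := l)
          omega
        have hnot : b ∉ l := by
          intro hm; exact absurd (List.count_pos_iff.mpr hm) (by omega)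
        rw [List.erase_cons_head]
        have : l.filter (fun x => !(x == b)) = l := by
          apply List.filter_eq_self.mpr
          intro x hx
          have hxb : x ≠ b := fun he => hnot (he ▸ hx)
          simp [hxb]
        simp [this]
      · have hc : l.count a ≤ 1 :=
          le_trans (List.Sublist.count_le a (List.sublist_cons_self b l)) h
        rw [List.erase_cons, if_neg (by simp [hba]), List.filter_cons,
          if_pos (by simp [hba]), ih a hc]

-- A's removal fold, over names each occurring at most once, is a single filter
lemma foldl_erase_eq_filter :
    ∀ (S : PySem.Set String) (l : List String), (∀ x ∈ S, l.count x ≤ 1) →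
      S.foldl (fun fs field => fs.erase field) l
        = l.filter (fun f => !(PySem.Set.contains S f)) := by
  intro S
  induction S with
  | nil =>
      intro l _
      simp [PySem.Set.contains]
  | cons i S ih =>
      intro l h
      have hcounts : ∀ x ∈ S, (l.erase i).count x ≤ 1 := by
        intro x hx
        exact le_trans (List.Sublist.count_le x List.erase_sublist)
          (h x (List.mem_cons_of_mem _ hx))
      rw [List.foldl_cons, ih (l.erase i) hcounts,
        erase_eq_filter_of_count_le_one l i (h i List.mem_cons_self),
        List.filter_filter]
      apply List.filter_congr
      intro x _
      by_cases hxi : x = i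
      · simp [hxi, PySem.Set.contains]
      · simp [PySem.Set.contains, hxi]

-- membership in B's trigger fold comes from the base set or a triggered row
lemma mem_foldl_union (fields : List String) :
    ∀ (l : List (String × List String)) (s0 : PySem.Set String) (x : String),
      x ∈ l.foldl (fun s p => if fields.contains p.1 then PySem.Set.union s p.2 else s) s0 →
      x ∈ s0 ∨ ∃ p ∈ l, p.1 ∈ fields ∧ x ∈ p.2 := by
  intro l
  induction l with
  | nil => intro s0 x hx; exact Or.inl hx
  | cons p l ih =>
      intro s0 x hx
      rw [List.foldl_cons] at hx
      rcases ih _ x hx with h1 | ⟨q, hq, hqf, hxq⟩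
      · by_cases hp : fields.contains p.1
        · rw [if_pos hp] at h1
          rcases (PySem.Set.mem_union _ _ _).mp h1 with h | h
          · exact Or.inl h
          · exact Or.inr ⟨p, List.mem_cons_self, by simpa using hp, h⟩
        · rw [if_neg hp] at h1
          exact Or.inl h1
      · exact Or.inr ⟨q, List.mem_cons_of_mem _ hq, hqf, hxq⟩

-- ===== VERDICT (by name: the statement is the Claim_ definition above) =====
theorem filter_report_fields_spec : Claim_equal_filter_report_fields := by
  intro report fields _ hpre
  unfold Spec_filter_report_fields
  rw [fields_eq_A, fields_eq_B, guarded_erase_eq_erase]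
  set b1 := fields.contains "Date"
  set b2 := fields.contains "ActiveViewCpm"
  set b3 := fields.contains "AllConversionRate"
  set b4 := fields.contains "AverageCpe"
  set b5 := fields.contains "AverageCost"
  set b6 := fields.contains "AverageCpm"
  set b7 := fields.contains "AverageCpv"
  set b8 := fields.contains "AverageFrequency"
  have hmem : ∀ x, x ∈ pvIncA b1 b2 b3 b4 b5 b6 b7 b8 ↔ x ∈ pvIncB b1 b2 b3 b4 b5 b6 b7 b8 :=
    (PySem.Set.equal_iff _ _).mp (pvInc_equal b1 b2 b3 b4 b5 b6 b7 b8)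
  have hIncB : pvIncB b1 b2 b3 b4 b5 b6 b7 b8 = pvTriggers.foldl
      (fun s p => if fields.contains p.1 then PySem.Set.union s p.2 else s)
      (PySem.Set.ofList pvBase) := rfl
  have hcount : ∀ x ∈ pvIncA b1 b2 b3 b4 b5 b6 b7 b8, fields.count x ≤ 1 := by
    intro x hx
    have hxB := (hmem x).mp hx
    rw [hIncB] at hxB
    rcases mem_foldl_union fields pvTriggers _ x hxB with h | ⟨p, hp, hpf, hxp⟩
    · exact hpre.1 x ((PySem.Set.mem_ofList _ _).mp h)
    · exact hpre.2 p hp hpf x hxp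
  rw [foldl_erase_eq_filter _ fields hcount]
  apply List.filter_congr
  intro x _
  by_cases hx : x ∈ pvIncA b1 b2 b3 b4 b5 b6 b7 b8
  · rw [(PySem.Set.contains_iff _ _).mpr hx,
      (PySem.Set.contains_iff _ _).mpr ((hmem x).mp hx)]
  · have h1 : PySem.Set.contains (pvIncA b1 b2 b3 b4 b5 b6 b7 b8) x = false := by
      cases hb : PySem.Set.contains (pvIncA b1 b2 b3 b4 b5 b6 b7 b8) x
      · rfl
      · exact absurd ((PySem.Set.contains_iff _ _).mp hb) hx
    have h2 : PySem.Set.contains (pvIncB b1 b2 b3 b4 b5 b6 b7 b8) x = false := by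
      cases hb : PySem.Set.contains (pvIncB b1 b2 b3 b4 b5 b6 b7 b8) x
      · rfl
      · exact absurd ((hmem x).mpr ((PySem.Set.contains_iff _ _).mp hb)) hx
    rw [h1, h2]
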